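-- pv_equiv track=rewrite | github.com/adcosta17/somrit | filter.py | get_nearby_with_position
-- ===== SOURCE A (Python) =====
-- def get_nearby_with_position(chrom, start, end, seen):
--     i = start
--     nearby = {}
--     count = 0
--     if chrom not in seen:
--         return nearby
--     while i < end:
--         if i in seen[chrom]:
--             nearby[count] = [seen[chrom][i], i]
--             count += 1
--         i += 1
--     return nearby
-- ===== SOURCE B (Python) =====
-- def get_nearby_with_position(chrom, start, end, seen):
--     d = seen.get(chrom)
--     if d is None:
--         return {}
--     pairs = sorted(((k, v) for k, v in d.items() if start <= k < end),
--                    key=lambda p: p[0])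
--     return {i: [v, k] for i, (k, v) in enumerate(pairs)}
-- ===== Notes on version B (the rewrite author's own statement) =====
-- stated objective: alternative
-- what changed: B iterates the dict's stored (position, value) items directly (filter to [start,end), sort by position, enumerate into the result dict) instead of testing every integer of [start,end) for membership.
import Mathlib
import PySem

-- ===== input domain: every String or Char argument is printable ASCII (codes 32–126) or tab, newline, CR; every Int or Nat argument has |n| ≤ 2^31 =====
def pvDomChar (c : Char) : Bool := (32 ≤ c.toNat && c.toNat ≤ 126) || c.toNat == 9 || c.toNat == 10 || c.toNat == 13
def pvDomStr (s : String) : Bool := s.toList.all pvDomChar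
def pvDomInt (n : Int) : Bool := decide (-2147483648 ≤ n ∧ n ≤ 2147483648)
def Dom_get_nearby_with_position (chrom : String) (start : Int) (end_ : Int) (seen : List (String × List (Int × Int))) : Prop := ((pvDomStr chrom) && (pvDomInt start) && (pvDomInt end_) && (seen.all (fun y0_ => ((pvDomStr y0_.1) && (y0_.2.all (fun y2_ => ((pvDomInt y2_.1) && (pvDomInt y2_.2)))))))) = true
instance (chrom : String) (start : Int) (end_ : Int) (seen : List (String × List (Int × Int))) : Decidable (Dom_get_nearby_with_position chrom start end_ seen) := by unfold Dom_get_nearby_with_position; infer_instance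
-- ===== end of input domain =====

-- B enumerates the dict's stored (position, value) items (filter to [start,end), sort by position) instead of scanning every integer of the interval.
-- ===== PORT A =====
def get_nearby_with_position (chrom : String) (start : Int) (end_ : Int) (seen : List (String × List (Int × Int))) : List (Int × List Int) :=
  let sd := PySem.Dict.ofList seen
  if !(sd.contains chrom) then []
  else
    let inner := PySem.Dict.ofList (sd.getD chrom [])
    -- 'i = start; while i < end: ...; i += 1' is a scan over range(start, end)
    ((PySem.List.pyRange start end_ 1).foldl
      (fun (st : PySem.Dict Int (List Int) × Int) i =>
        if inner.contains i then (st.1.insert st.2 [inner.getD i 0, i], st.2 + 1) else st)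
      (PySem.Dict.empty, 0)).1.items

-- ===== PORT B =====
def get_nearby_with_position_alt (chrom : String) (start : Int) (end_ : Int) (seen : List (String × List (Int × Int))) : List (Int × List Int) :=
  match (PySem.Dict.ofList seen).get? chrom with
  | none => []
  | some lst =>
    let pairs := PySem.List.sorted
      ((PySem.Dict.ofList lst).items.filter (fun p => decide (start ≤ p.1) && decide (p.1 < end_)))
      (fun p => p.1) false
    (PySem.List.enumerate pairs 0).map (fun q => (q.1, [q.2.2, q.2.1]))

-- ===== PRECONDITION & SPEC =====
def Spec_get_nearby_with_position (chrom : String) (start : Int) (end_ : Int) (seen : List (String × List (Int × Int))) (out : List (Int × List Int)) : Prop := out = get_nearby_with_position_alt chrom start end_ seen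
instance (chrom : String) (start : Int) (end_ : Int) (seen : List (String × List (Int × Int))) (out : List (Int × List Int)) : Decidable (Spec_get_nearby_with_position chrom start end_ seen out) := by unfold Spec_get_nearby_with_position; infer_instance

-- ===== CLAIM (what is proved, stated in full; the proofs are below) =====
def Claim_equal_get_nearby_with_position : Prop := ∀ (chrom : String) (start : Int) (end_ : Int) (seen : List (String × List (Int × Int))), Dom_get_nearby_with_position chrom start end_ seen → Spec_get_nearby_with_position chrom start end_ seen (get_nearby_with_position chrom start end_ seen)

-- ===== LEMMAS AND PROOFS =====

-- A's counting loop over a list of positions inserts fresh increasing keys, i.e. appends the enumerated list.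
theorem fold_count_eq_enumerate (f : Int → List Int) :
    ∀ (L : List Int) (d : PySem.Dict Int (List Int)) (c : Int),
      (L.foldl (fun (st : PySem.Dict Int (List Int) × Int) i =>
          (st.1.insert st.2 (f i), st.2 + 1)) (d, c)).1
      = (PySem.List.enumerate L c).foldl (fun d p => d.insert p.1 (f p.2)) d := by
  intro L
  induction L with
  | nil => intro d c; simp [PySem.List.enumerate_nil]
  | cons x t ih =>
    intro d c
    simp only [List.foldl_cons, PySem.List.enumerate_cons]
    exact ih (d.insert c (f x)) (c + 1)

theorem enumerate_map {α β : Type} (g : α → β) :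
    ∀ (xs : List α) (s : Int),
      PySem.List.enumerate (xs.map g) s
        = (PySem.List.enumerate xs s).map (fun p => (p.1, g p.2)) := by
  intro xs
  induction xs with
  | nil => intro s; simp [PySem.List.enumerate_nil]
  | cons x t ih => intro s; simp [PySem.List.enumerate_cons, ih]

-- B's sorted filtered item list is A's filtered range, paired with the stored values.
theorem sorted_filtered_items_eq (inner : PySem.Dict Int Int) (hnd : inner.keys.Nodup) (start end_ : Int) :
    PySem.List.sorted
      (inner.items.filter (fun p => decide (start ≤ p.1) && decide (p.1 < end_)))
      (fun p => p.1) false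
    = ((PySem.List.pyRange start end_ 1).filter (fun i => inner.contains i)).map
        (fun i => (i, inner.getD i 0)) := by
  apply PySem.List.sorted_eq_of_perm_of_pairwise_lt
  · -- permutation
    have hitems : inner.items = inner.keys.map (fun k => (k, inner.getD k 0)) :=
      PySem.Dict.items_eq_map_keys inner hnd 0
    rw [hitems, List.filter_map]
    have hkeys : (inner.keys.filter (fun k => decide (start ≤ k) && decide (k < end_))).Perm
        ((PySem.List.pyRange start end_ 1).filter (fun i => inner.contains i)) := by
      apply (List.perm_ext_iff_of_nodup (hnd.filter _)
        ((PySem.List.nodup_pyRange_one start end_).filter _)).mpr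
      intro a
      simp only [List.mem_filter, PySem.List.mem_pyRange_one, Bool.and_eq_true, decide_eq_true_eq,
        PySem.Dict.contains_iff_mem_keys]
      tauto
    exact (hkeys.map _).symm
  · -- strictly increasing first components
    simp only [List.pairwise_map]
    exact (PySem.List.pairwise_lt_pyRange_one start end_).filter (fun i => inner.contains i)

-- ===== VERDICT (by name: the statement is the Claim_ definition above) =====
theorem get_nearby_with_position_spec : Claim_equal_get_nearby_with_position := by
  intro chrom start end_ seen _
  unfold Spec_get_nearby_with_position get_nearby_with_position get_nearby_with_position_alt
  dsimp only
  rcases hg : (PySem.Dict.ofList seen).get? chrom with _ | lst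
  · have hc : (PySem.Dict.ofList seen).contains chrom = false := by
      rw [PySem.Dict.contains_eq_isSome_get?, hg]; rfl
    simp [hc]
  · have hc : (PySem.Dict.ofList seen).contains chrom = true := by
      rw [PySem.Dict.contains_eq_isSome_get?, hg]; rfl
    have hget : (PySem.Dict.ofList seen).getD chrom [] = lst := by
      simp [PySem.Dict.getD, hg]
    simp only [hc, Bool.not_true, Bool.false_eq_true, if_false, hget]
    rw [PySem.List.foldl_if_eq_foldl_filter,
      fold_count_eq_enumerate (fun i => [(PySem.Dict.ofList lst).getD i 0, i]),
      sorted_filtered_items_eq (PySem.Dict.ofList lst) (PySem.Dict.nodup_keys_ofList lst) start end_,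
      enumerate_map, List.map_map]
    set L := (PySem.List.pyRange start end_ 1).filter (fun i => (PySem.Dict.ofList lst).contains i) with hL
    rw [PySem.Dict.items_foldl_insert_fresh
      (l := PySem.List.enumerate L 0)
      (k := fun (p : Int × Int) => p.1)
      (v := fun p => [(PySem.Dict.ofList lst).getD p.2 0, p.2])
      (d := PySem.Dict.empty)
      (by intro a _; exact PySem.Dict.contains_empty _)
      (by rw [PySem.List.map_fst_enumerate]; exact PySem.List.nodup_pyRange_one 0 _)]
    rfl
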